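-- pv_equiv track=rewrite | github.com/ppham27/Project-Euler | prime.py | _factors_to_divisors
-- ===== SOURCE A (Python) =====
-- def _factors_to_divisors(f):
--     res = {1}
--     if f is None or len(f)==0:
--         return res
--
--     res.update(_factors_to_divisors(f[1:]))
--     for d in list(res):
--         res.add(f[0]*d)
--
--     return res
-- ===== SOURCE B (Python) =====
-- def _factors_to_divisors(f):
--     # Iterative rewrite: fold over the reversed factor list instead of slicing
--     # recursion; each step rebuilds the set as {1} | divisors and grows it with
--     # one comprehension-driven update (no recursion depth limit, no O(m^2) slices).
--     divisors = {1}
--     for p in reversed(f or ()):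
--         divisors = {1} | divisors
--         divisors.update([p * d for d in divisors])
--     return divisors
-- ===== Notes on version B (the rewrite author's own statement) =====
-- stated objective: simpler
-- what changed: Replaces A's slicing recursion (res={1}, update with the recursive result of f[1:], then an element-by-element add loop over a snapshot) with a single iterative fold over the reversed factor list whose step rebuilds the set as {1} | divisors and grows it with one comprehension-driven update, removing the recursion (and its depth limit) and the per-level list slice.
import Mathlib
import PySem

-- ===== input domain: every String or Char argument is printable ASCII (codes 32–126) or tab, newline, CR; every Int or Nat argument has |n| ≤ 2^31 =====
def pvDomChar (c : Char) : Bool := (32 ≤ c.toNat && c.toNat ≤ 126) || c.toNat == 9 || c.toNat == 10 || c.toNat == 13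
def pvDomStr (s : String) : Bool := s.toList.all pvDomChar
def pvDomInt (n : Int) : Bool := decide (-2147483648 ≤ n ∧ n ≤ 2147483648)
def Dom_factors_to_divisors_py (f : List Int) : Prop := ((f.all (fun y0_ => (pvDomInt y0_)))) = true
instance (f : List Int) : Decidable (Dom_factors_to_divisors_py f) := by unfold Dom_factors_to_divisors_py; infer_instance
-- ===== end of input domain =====

-- B replaces A's slicing recursion by one iterative fold over the reversed factor list, each
-- step rebuilding the set as {1} | divisors and growing it with a single comprehension-driven
-- update (no recursion depth limit, no per-level list slice); same divisor set, proved equal.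

-- ===== PORT A =====
def factors_to_divisors_py (f : List Int) : List Int :=
  match f with
  | [] => PySem.Set.ofList [1]                 -- res = {1}; len(f)==0 → return res
  | h :: t =>
    -- res.update(_factors_to_divisors(f[1:]))   (f[1:] = t)
    let res := PySem.Set.update (PySem.Set.ofList [1]) (factors_to_divisors_py t)
    -- for d in list(res): res.add(f[0]*d)   (list(res) snapshots res, then adds one by one)
    res.foldl (fun s d => PySem.Set.add s (h * d)) res

-- ===== PORT B =====
-- loop body: divisors = {1} | divisors; divisors.update([p * d for d in divisors])
def bStep (divisors : List Int) (p : Int) : List Int :=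
  let r := PySem.Set.update (PySem.Set.ofList [1]) divisors
  PySem.Set.update r (r.map (fun d => p * d))

def factors_to_divisors_py_alt (f : List Int) : List Int :=
  -- divisors = {1}; for p in reversed(f or ()): …
  f.reverse.foldl bStep (PySem.Set.ofList [1])

-- ===== PRECONDITION & SPEC =====
def Spec_factors_to_divisors_py (f : List Int) (out : List Int) : Prop := out = factors_to_divisors_py_alt f
instance (f : List Int) (out : List Int) : Decidable (Spec_factors_to_divisors_py f out) := by unfold Spec_factors_to_divisors_py; infer_instance

-- ===== CLAIM (what is proved, stated in full; the proofs are below) =====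
def Claim_equal_factors_to_divisors_py : Prop := ∀ (f : List Int), Dom_factors_to_divisors_py f → Spec_factors_to_divisors_py f (factors_to_divisors_py f)

-- ===== LEMMAS AND PROOFS =====

-- A's 'for d in list(res): res.add(h*d)' is one set-update with the mapped snapshot
theorem foldl_add_eq_update (h : Int) (s : PySem.Set Int) :
    s.foldl (fun acc d => PySem.Set.add acc (h * d)) s
      = PySem.Set.update s (s.map (fun d => h * d)) :=
  (PySem.Set.update_map_eq_foldl_add ..).symm

-- A computed as a right fold of B's step over the factor list
theorem A_eq_foldr (f : List Int) :
    factors_to_divisors_py f = f.foldr (fun p s => bStep s p) (PySem.Set.ofList [1]) := by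
  induction f with
  | nil => rfl
  | cons h t ih =>
      simp only [factors_to_divisors_py, List.foldr_cons, ← ih, foldl_add_eq_update]
      rfl

-- ===== VERDICT (by name: the statement is the Claim_ definition above) =====
theorem factors_to_divisors_py_spec : Claim_equal_factors_to_divisors_py := by
  intro f _hdom
  show factors_to_divisors_py f = factors_to_divisors_py_alt f
  rw [A_eq_foldr]
  unfold factors_to_divisors_py_alt
  rw [List.foldl_reverse]
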